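-- pv_equiv track=rewrite | github.com/S8-StudyGroup/Navigate-Basic-Algorithms | NBA_deokgyun/09/week_3rd/17681.py | solution
-- ===== SOURCE A (Python) =====
-- def solution(n, arr1, arr2):
--     maze_string = ""
--     answer = []
--     for i in range(n):
--         for j in range(n - 1, -1, -1):
--             if arr1[i] & 1 << j or arr2[i] & 1 << j:
--                 maze_string += "#"
--             else:
--                 maze_string += " "
--         answer.append(maze_string)
--         maze_string = ""
--     return answer
-- ===== SOURCE B (Python) =====
-- def solution(n, arr1, arr2):
--     table = str.maketrans("10", "# ")
--     return [format((arr1[i] | arr2[i]) & ((1 << n) - 1), "0%db" % n).translate(table)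
--             for i in range(n)]
-- ===== Notes on version B (the rewrite author's own statement) =====
-- stated objective: idiomatic
-- what changed: B replaces A's per-bit inner loop (testing arr1[i]&1<<j and arr2[i]&1<<j for each j) by OR-ing the two row masks once, rendering the masked value as a fixed-width binary string with format(), and translating '1'/'0' to '#'/' ' with str.translate.
import Mathlib
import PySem

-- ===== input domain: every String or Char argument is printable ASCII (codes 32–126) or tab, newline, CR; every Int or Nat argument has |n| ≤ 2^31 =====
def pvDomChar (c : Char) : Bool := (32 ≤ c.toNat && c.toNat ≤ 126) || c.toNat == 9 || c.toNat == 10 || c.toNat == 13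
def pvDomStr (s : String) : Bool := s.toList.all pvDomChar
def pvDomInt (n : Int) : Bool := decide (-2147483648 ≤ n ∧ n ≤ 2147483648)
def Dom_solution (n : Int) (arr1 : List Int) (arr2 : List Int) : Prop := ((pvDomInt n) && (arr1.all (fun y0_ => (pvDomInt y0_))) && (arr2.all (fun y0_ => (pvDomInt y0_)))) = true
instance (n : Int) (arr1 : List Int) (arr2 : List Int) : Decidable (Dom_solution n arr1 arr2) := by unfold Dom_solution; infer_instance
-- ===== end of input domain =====

-- B renders each row by OR-ing the two masks once and formatting the masked value as a
-- fixed-width binary string whose digits are then translated to '#'/' ' (idiomatic, same cost).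

-- ===== PORT A =====
-- Literal port of A: outer loop over range(n), inner loop over range(n-1,-1,-1) testing
-- arr1[i] & (1 << j) / arr2[i] & (1 << j) and appending '#' or ' '.  The inner loop variable j
-- is always ≥ 0, so `j.toNat` is exact for Python's `1 << j` there.
def solution (n : Int) (arr1 : List Int) (arr2 : List Int) : List String :=
  (PySem.List.pyRange 0 n 1).foldl
    (fun answer i =>
      answer ++ [String.mk
        ((PySem.List.pyRange (n - 1) (-1) (-1)).foldl
          (fun s j =>
            if PySem.Int.band (PySem.List.pyGetD arr1 i 0) ((1 <<< j.toNat : Nat) : Int) ≠ 0 ∨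
               PySem.Int.band (PySem.List.pyGetD arr2 i 0) ((1 <<< j.toNat : Nat) : Int) ≠ 0
            then s ++ ['#'] else s ++ [' '])
          [])])
    []

-- ===== PORT B =====
-- `format(v, "0%db" % n)` for a nonnegative v: binary digits of v, MSB first, zero-padded to
-- width n.  `binDigitsGo` is the digit recursion (v -> v/2) with a structural fuel counter;
-- fuel = v always suffices (the recursion depth is at most log2 v + 1).
def binDigitsGo : Nat → Nat → List Char
  | 0, v => [if v = 1 then '1' else '0']
  | fuel + 1, v =>
      if v < 2 then [if v = 1 then '1' else '0']
      else binDigitsGo fuel (v / 2) ++ [if v % 2 = 1 then '1' else '0']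

def binDigits (v : Nat) : List Char := binDigitsGo v v

def formatBin (v : Nat) (w : Nat) : List Char :=
  List.replicate (w - (binDigits v).length) '0' ++ binDigits v

-- str.maketrans("10", "# ") + translate: '1' -> '#', '0' -> ' ', anything else unchanged.
def trans10 (c : Char) : Char := if c = '1' then '#' else if c = '0' then ' ' else c

-- The mask (1 << n) - 1 is only evaluated inside the comprehension (so n ≥ 1 there, and
-- `n.toNat` is exact); the masked value is nonnegative, so `.toNat` is exact too.
def solution_alt (n : Int) (arr1 : List Int) (arr2 : List Int) : List String :=
  (PySem.List.pyRange 0 n 1).map (fun i =>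
    String.mk ((formatBin
      (PySem.Int.band
        (PySem.Int.bor (PySem.List.pyGetD arr1 i 0) (PySem.List.pyGetD arr2 i 0))
        (((1 <<< n.toNat : Nat) : Int) - 1)).toNat
      n.toNat).map trans10))

-- ===== PRECONDITION & SPEC =====
-- Pre_ excludes exactly the inputs where Python A raises IndexError: rows 0..n-1 of both
-- arrays are read, so both lists must have length ≥ n (any n ≤ 0 is fine: the loop is empty).
def Pre_solution (n : Int) (arr1 : List Int) (arr2 : List Int) : Prop :=
  n ≤ (arr1.length : Int) ∧ n ≤ (arr2.length : Int)
instance (n : Int) (arr1 : List Int) (arr2 : List Int) : Decidable (Pre_solution n arr1 arr2) := by unfold Pre_solution; infer_instance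

def pvWitness_solution : Int × List Int × List Int := (2, [2, 1], [1, 2])

def Spec_solution (n : Int) (arr1 : List Int) (arr2 : List Int) (out : List String) : Prop := out = solution_alt n arr1 arr2
instance (n : Int) (arr1 : List Int) (arr2 : List Int) (out : List String) : Decidable (Spec_solution n arr1 arr2 out) := by unfold Spec_solution; infer_instance

-- ===== CLAIM (what is proved, stated in full; the proofs are below) =====
def Claim_equal_solution : Prop := ∀ (n : Int) (arr1 : List Int) (arr2 : List Int), Dom_solution n arr1 arr2 → Pre_solution n arr1 arr2 → Spec_solution n arr1 arr2 (solution n arr1 arr2)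

-- ===== LEMMAS AND PROOFS =====

-- Python's bit j of an integer a (two's complement on negatives).
def intBit (a : Int) (j : Nat) : Bool :=
  if 0 ≤ a then a.toNat.testBit j else !((-a - 1).toNat.testBit j)

lemma tb_sub_and (j : Nat) : ∀ x y : Nat,
    (x - (x &&& y)).testBit j = (x.testBit j && !(y.testBit j)) := by
  induction j with
  | zero =>
    intro x y
    have h1 : x &&& y ≤ x := Nat.and_le_left
    have h2 : (x &&& y) % 2 = 1 ↔ x % 2 = 1 ∧ y % 2 = 1 := Nat.and_mod_two_eq_one
    have h3 : (x &&& y) / 2 ≤ x / 2 := by rw [Nat.and_div_two]; exact Nat.and_le_left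
    simp only [Nat.testBit_zero]
    rcases Nat.mod_two_eq_zero_or_one x with hx | hx <;>
      rcases Nat.mod_two_eq_zero_or_one y with hy | hy <;>
      simp [hx, hy] <;> omega
  | succ j ih =>
    intro x y
    have h1 : x &&& y ≤ x := Nat.and_le_left
    have h2 : (x &&& y) % 2 = 1 ↔ x % 2 = 1 ∧ y % 2 = 1 := Nat.and_mod_two_eq_one
    have h3 : (x &&& y) / 2 = x / 2 &&& y / 2 := Nat.and_div_two
    have h4 : x / 2 &&& y / 2 ≤ x / 2 := Nat.and_le_left
    have hdiv : (x - (x &&& y)) / 2 = x / 2 - (x / 2 &&& y / 2) := by omega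
    rw [Nat.testBit_succ, Nat.testBit_succ, Nat.testBit_succ, hdiv, ih]

lemma shift_one (j : Nat) : (1 <<< j : Nat) = 2 ^ j := by
  rw [Nat.shiftLeft_eq, one_mul]

lemma band_pow_ne (a : Int) (j : Nat) :
    (PySem.Int.band a ((1 <<< j : Nat) : Int) ≠ 0) ↔ intBit a j = true := by
  rw [shift_one]
  unfold PySem.Int.band intBit
  by_cases ha : 0 ≤ a
  · simp only [ha, if_true, Int.natCast_nonneg, Int.toNat_natCast]
    rw [Nat.and_two_pow]
    cases htb : a.toNat.testBit j
    · simp [htb]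
    · simp [htb, (Nat.two_pow_pos j).ne']
  · simp only [ha, if_false, Int.natCast_nonneg, if_true, Int.toNat_natCast]
    rw [Nat.two_pow_and]
    cases htb : (-a - 1).toNat.testBit j
    · simp [htb, (Nat.two_pow_pos j).ne']
    · simp [htb]

lemma intBit_bor (a b : Int) (j : Nat) :
    intBit (PySem.Int.bor a b) j = (intBit a j || intBit b j) := by
  unfold PySem.Int.bor intBit
  by_cases ha : 0 ≤ a <;> by_cases hb : 0 ≤ b
  · have h : (0:Int) ≤ ((a.toNat ||| b.toNat : Nat) : Int) := Int.natCast_nonneg _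
    simp [ha, hb, h, Nat.testBit_or]
  · set m := (-b - 1).toNat with hm
    have hneg : ¬ (0:Int) ≤ -((m - (m &&& a.toNat) : Nat) : Int) - 1 := by
      have : (0:Int) ≤ ((m - (m &&& a.toNat) : Nat) : Int) := Int.natCast_nonneg _
      omega
    have hval : (-(-((m - (m &&& a.toNat) : Nat) : Int) - 1) - 1) = ((m - (m &&& a.toNat) : Nat) : Int) := by ring
    simp only [ha, hb, if_true, if_false, hneg, hval, Int.toNat_natCast]
    rw [tb_sub_and]
    cases hx : m.testBit j <;> cases hy : a.toNat.testBit j <;> simp [hx, hy]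
  · set m := (-a - 1).toNat with hm
    have hneg : ¬ (0:Int) ≤ -((m - (m &&& b.toNat) : Nat) : Int) - 1 := by
      have : (0:Int) ≤ ((m - (m &&& b.toNat) : Nat) : Int) := Int.natCast_nonneg _
      omega
    have hval : (-(-((m - (m &&& b.toNat) : Nat) : Int) - 1) - 1) = ((m - (m &&& b.toNat) : Nat) : Int) := by ring
    simp only [ha, hb, if_true, if_false, hneg, hval, Int.toNat_natCast]
    rw [tb_sub_and]
    cases hx : m.testBit j <;> cases hy : b.toNat.testBit j <;> simp [hx, hy]
  · set ma := (-a - 1).toNat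
    set mb := (-b - 1).toNat
    have hneg : ¬ (0:Int) ≤ -((ma &&& mb : Nat) : Int) - 1 := by
      have : (0:Int) ≤ ((ma &&& mb : Nat) : Int) := Int.natCast_nonneg _
      omega
    have hval : (-(-((ma &&& mb : Nat) : Int) - 1) - 1) = ((ma &&& mb : Nat) : Int) := by ring
    simp only [ha, hb, if_false, hneg, hval, Int.toNat_natCast]
    rw [Nat.testBit_and]
    cases hx : ma.testBit j <;> cases hy : mb.testBit j <;> simp [hx, hy]

lemma mask_cast (w : Nat) : ((1 <<< w : Nat) : Int) - 1 = ((2 ^ w - 1 : Nat) : Int) := by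
  rw [Nat.shiftLeft_eq, one_mul, Nat.cast_sub (Nat.two_pow_pos w)]
  push_cast; ring

lemma band_mask_lt (c : Int) (w : Nat) :
    (PySem.Int.band c (((1 <<< w : Nat) : Int) - 1)).toNat < 2 ^ w := by
  rw [mask_cast]
  unfold PySem.Int.band
  have h1 : (0:Nat) < 2 ^ w := Nat.two_pow_pos w
  by_cases hc : 0 ≤ c
  · simp only [hc, if_true, Int.natCast_nonneg, Int.toNat_natCast]
    have := Nat.and_le_right (n := c.toNat) (m := 2 ^ w - 1)
    omega
  · simp only [hc, if_false, Int.natCast_nonneg, if_true, Int.toNat_natCast]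
    omega

lemma band_mask_testBit (c : Int) (w j : Nat) (hj : j < w) :
    (PySem.Int.band c (((1 <<< w : Nat) : Int) - 1)).toNat.testBit j = intBit c j := by
  rw [mask_cast]
  unfold PySem.Int.band intBit
  by_cases hc : 0 ≤ c
  · simp only [hc, if_true, Int.natCast_nonneg, Int.toNat_natCast]
    rw [Nat.testBit_and, Nat.testBit_two_pow_sub_one]
    simp [hj]
  · simp only [hc, if_false, Int.natCast_nonneg, if_true, Int.toNat_natCast]
    rw [tb_sub_and, Nat.testBit_two_pow_sub_one]
    simp [hj]

lemma testBit_small (v : Nat) (h : v < 2) : v.testBit 0 = decide (v = 1) := by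
  interval_cases v <;> decide

-- a one-digit value padded to width w is w-1 zeros and its bit 0
lemma pad_small (v w : Nat) (hv : v < 2) (hw : 1 ≤ w) :
    List.replicate (w - 1) '0' ++ [if v = 1 then '1' else '0']
      = (List.range w).reverse.map (fun j => if v.testBit j then '1' else '0') := by
  induction w with
  | zero => omega
  | succ w ih =>
    rcases Nat.eq_zero_or_pos w with rfl | hw'
    · simp [List.range_succ, testBit_small v hv]
    · rw [List.range_succ]
      have h2 : (2 : Nat) ≤ 2 ^ w := by
        have := Nat.pow_le_pow_right (show 0 < 2 by omega) hw'
        simpa using this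
      have hbit : v.testBit w = false :=
        Nat.testBit_lt_two_pow (lt_of_lt_of_le hv h2)
      have hrep : w + 1 - 1 = (w - 1) + 1 := by omega
      rw [hrep]
      simp only [List.reverse_append, List.reverse_singleton, List.map_cons, List.map_append,
        List.singleton_append, hbit, if_false, List.replicate_succ, List.cons_append]
      rw [ih hw']
      simp

lemma pad_go (fuel : Nat) : ∀ v w : Nat, v ≤ fuel + 1 → 1 ≤ w → v < 2 ^ w →
    List.replicate (w - (binDigitsGo fuel v).length) '0' ++ binDigitsGo fuel v
      = (List.range w).reverse.map (fun j => if v.testBit j then '1' else '0') := by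
  induction fuel with
  | zero =>
    intro v w hv hw _
    have hv2 : v < 2 := by omega
    simpa [binDigitsGo] using pad_small v w hv2 hw
  | succ fuel ih =>
    intro v w hv hw hvw
    by_cases hv2 : v < 2
    · simpa [binDigitsGo, hv2] using pad_small v w hv2 hw
    · have hw2 : 2 ≤ w := by
        by_contra hcon
        have : w = 1 := by omega
        subst this
        simp at hvw; omega
      have hpow : 2 ^ w = 2 * 2 ^ (w - 1) := by
        rw [← pow_succ']
        congr 1
        omega
      have hrec : v / 2 < 2 ^ (w - 1) := by omega
      have hfuel : v / 2 ≤ fuel + 1 := by omega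
      have hw1 : 1 ≤ w - 1 := by omega
      have hwsub : w = (w - 1) + 1 := by omega
      rw [show binDigitsGo (fuel + 1) v = binDigitsGo fuel (v / 2) ++ [if v % 2 = 1 then '1' else '0'] from by
        simp [binDigitsGo, hv2]]
      have hIH := ih (v / 2) (w - 1) hfuel hw1 hrec
      calc List.replicate (w - (binDigitsGo fuel (v / 2) ++ [if v % 2 = 1 then '1' else '0']).length) '0'
            ++ (binDigitsGo fuel (v / 2) ++ [if v % 2 = 1 then '1' else '0'])
          = (List.replicate ((w - 1) - (binDigitsGo fuel (v / 2)).length) '0'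
              ++ binDigitsGo fuel (v / 2)) ++ [if v % 2 = 1 then '1' else '0'] := by
            rw [List.length_append, List.length_singleton, List.append_assoc]
            congr 2
            omega
        _ = ((List.range (w - 1)).reverse.map (fun j => if (v / 2).testBit j then '1' else '0'))
              ++ [if v % 2 = 1 then '1' else '0'] := by rw [hIH]
        _ = (List.range w).reverse.map (fun j => if v.testBit j then '1' else '0') := by
            conv_rhs => rw [hwsub, List.range_succ_eq_map]
            simp only [List.reverse_cons, List.map_append, List.map_reverse, List.map_map,
              List.map_cons, List.map_nil]
            congr 1
            · congr 1
              apply List.map_congr_left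
              intro j _
              simp [Function.comp, Nat.testBit_succ]
            · simp [Nat.testBit_zero]

lemma formatBin_eq (m w : Nat) (hm : m < 2 ^ w) (hw : 1 ≤ w) :
    formatBin m w = (List.range w).reverse.map (fun j => if m.testBit j then '1' else '0') := by
  unfold formatBin binDigits
  exact pad_go m m w (by omega) hw hm

lemma cond_iff (a b : Int) (w j : Nat) (hj : j < w) :
    (PySem.Int.band a ((1 <<< j : Nat) : Int) ≠ 0 ∨
       PySem.Int.band b ((1 <<< j : Nat) : Int) ≠ 0)
      ↔ ((PySem.Int.band (PySem.Int.bor a b)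
          (((1 <<< w : Nat) : Int) - 1)).toNat.testBit j = true) := by
  rw [band_mask_testBit _ _ _ hj, intBit_bor, band_pow_ne, band_pow_ne]
  simp

lemma row_eq' (w : Nat) (hw : 1 ≤ w) (p : Nat → Prop) [DecidablePred p] (m : Nat)
    (hlt : m < 2 ^ w) (hbits : ∀ j, j < w → (p j ↔ m.testBit j = true)) :
    ((List.range w).reverse.map (fun j => if p j then '#' else ' '))
      = (formatBin m w).map trans10 := by
  rw [formatBin_eq m w hlt hw, List.map_map]
  apply List.map_congr_left
  intro j hj
  have hjw : j < w := by
    rw [List.mem_reverse, List.mem_range] at hj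
    exact hj
  have hiff := hbits j hjw
  by_cases hc : p j
  · have hb : m.testBit j = true := hiff.mp hc
    rw [if_pos hc]
    simp [Function.comp, hb, trans10]
  · have hb : m.testBit j = false := by
      cases h' : m.testBit j
      · rfl
      · exact absurd (hiff.mpr h') hc
    rw [if_neg hc]
    simp [Function.comp, hb, trans10]

lemma pyRange_nil_of_nonpos (n : Int) (hn : n ≤ 0) : PySem.List.pyRange 0 n 1 = [] := by
  simp [PySem.List.pyRange, show ¬(0 : Int) < n by omega]

lemma pyRange_desc (w : Nat) (hw : 1 ≤ w) :
    PySem.List.pyRange ((w : Int) - 1) (-1) (-1)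
      = (List.range w).reverse.map (fun k : Nat => (k : Int)) := by
  have h0 : 0 < w := hw
  have hlt : (-1 : Int) < (w : Int) - 1 := by omega
  have hunf : PySem.List.pyRange ((w : Int) - 1) (-1) (-1)
      = List.map (fun k : Nat => (w : Int) - 1 + -(k : Int)) (List.range w) := by
    norm_num [PySem.List.pyRange, hlt, h0]
  rw [hunf]
  apply List.ext_getElem
  · simp
  · intro i h1 h2
    have hi : i < w := by simpa using h1
    simp only [List.getElem_map, List.getElem_range, List.getElem_reverse,
      List.length_reverse, List.length_range]
    omega

theorem solution_eq_alt (n : Int) (arr1 : List Int) (arr2 : List Int) :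
    solution n arr1 arr2 = solution_alt n arr1 arr2 := by
  unfold solution solution_alt
  rcases (by omega : n ≤ 0 ∨ 0 < n) with hn | hn
  · rw [pyRange_nil_of_nonpos n hn]
    rfl
  · obtain ⟨w, rfl⟩ : ∃ w : Nat, n = (w : Int) :=
      ⟨n.toNat, (Int.toNat_of_nonneg hn.le).symm⟩
    have hw1 : 1 ≤ w := by exact_mod_cast hn
    rw [PySem.List.pyRange_zero_natCast, PySem.List.foldl_append_singleton_eq_map,
      List.nil_append]
    apply List.map_congr_left
    intro i _
    congr 1
    rw [PySem.List.foldl_congr_mem _ _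
        (fun s j => s ++ [if PySem.Int.band (PySem.List.pyGetD arr1 i 0) ((1 <<< j.toNat : Nat) : Int) ≠ 0 ∨
            PySem.Int.band (PySem.List.pyGetD arr2 i 0) ((1 <<< j.toNat : Nat) : Int) ≠ 0 then '#' else ' ']) _
        (by intro acc x _
            beta_reduce
            split <;> rename_i hcnd <;> simp [hcnd]),
      PySem.List.foldl_append_singleton_eq_map, List.nil_append, pyRange_desc w hw1,
      List.map_map]
    exact row_eq' w hw1 _ _
      (band_mask_lt (PySem.Int.bor (PySem.List.pyGetD arr1 i 0) (PySem.List.pyGetD arr2 i 0)) w)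
      (fun j hj => cond_iff (PySem.List.pyGetD arr1 i 0) (PySem.List.pyGetD arr2 i 0) w j hj)

-- ===== VERDICT (by name: the statement is the Claim_ definition above) =====
theorem solution_spec : Claim_equal_solution := by
  intro n arr1 arr2 _ _
  unfold Spec_solution
  exact solution_eq_alt n arr1 arr2
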